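-- pv_equiv track=rewrite | github.com/deniskrizanovic/sf_COSMIC_Measurer | .cursor/skills/cosmic-measurer/cosmic-apex-measurer/scripts/parser.py | _apex_in_single_quoted_string
-- ===== SOURCE A (Python) =====
-- def _apex_in_single_quoted_string(source: str, pos: int) -> bool:
--     """True if pos is inside an Apex single-quoted string on the same line (toggle on ')."""
--     line_start = source.rfind("\n", 0, pos) + 1
--     segment = source[line_start:pos]
--     in_string = False
--     i = 0
--     while i < len(segment):
--         c = segment[i]
--         if c == "'":
--             if i + 1 < len(segment) and segment[i + 1] == "'":
--                 i += 2
--                 continue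
--             in_string = not in_string
--         i += 1
--     return in_string
-- ===== SOURCE B (Python) =====
-- def _apex_in_single_quoted_string(source: str, pos: int) -> bool:
--     """True if pos is inside an Apex single-quoted string on the same line (quote parity)."""
--     line_start = source.rfind("\n", 0, pos) + 1
--     segment = source[line_start:pos]
--     # Escaped quotes are doubled; Python's non-overlapping left-to-right replace
--     # pairs adjacent quotes exactly as the greedy scan does, so the parity of the
--     # remaining single quotes is the in-string state.
--     return segment.replace("''", "").count("'") % 2 == 1
-- ===== Notes on version B (the rewrite author's own statement) =====
-- stated objective: simpler
-- what changed: Replaces the stateful index/toggle while-loop with a stateless parity computation: drop escaped doubled quotes via non-overlapping replace("''","") and test whether the count of remaining single quotes is odd.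
import Mathlib
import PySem

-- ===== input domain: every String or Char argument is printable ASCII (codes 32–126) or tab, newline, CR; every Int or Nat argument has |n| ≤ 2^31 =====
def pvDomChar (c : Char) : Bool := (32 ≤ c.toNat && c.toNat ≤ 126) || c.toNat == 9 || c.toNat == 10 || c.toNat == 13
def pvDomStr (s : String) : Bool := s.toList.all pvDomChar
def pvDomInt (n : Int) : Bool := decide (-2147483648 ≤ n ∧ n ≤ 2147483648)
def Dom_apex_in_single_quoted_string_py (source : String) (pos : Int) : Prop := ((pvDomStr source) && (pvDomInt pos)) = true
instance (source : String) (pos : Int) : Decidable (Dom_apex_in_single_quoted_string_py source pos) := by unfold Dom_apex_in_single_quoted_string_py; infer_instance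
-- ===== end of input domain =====

-- B replaces A's index/toggle while-loop by a stateless quote-parity test (drop "''" pairs, count remaining quotes): simpler, same cost.


-- ===== PORT A =====
-- A's while-loop over segment, as structural recursion on the remaining chars:
-- "if c == '\'': if next is also '\'': skip both and continue; else toggle; advance".
def pvScanA : List Char → Bool → Bool
  | [], b => b
  | c :: rest, b =>
    if c = '\'' ∧ rest.head? = some '\'' then pvScanA rest.tail b
    else if c = '\'' then pvScanA rest (!b)
    else pvScanA rest b
termination_by l => l.length
decreasing_by all_goals simp [List.length_tail]

def apex_in_single_quoted_string_py (source : String) (pos : Int) : Bool :=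
  let line_start := PySem.Str.rfindFrom source "\n" 0 (some pos) + 1
  let segment := PySem.Str.slice source (some line_start) (some pos)
  pvScanA segment.toList false

-- ===== PORT B =====
def apex_in_single_quoted_string_py_alt (source : String) (pos : Int) : Bool :=
  let line_start := PySem.Str.rfindFrom source "\n" 0 (some pos) + 1
  let segment := PySem.Str.slice source (some line_start) (some pos)
  decide (PySem.Str.count (PySem.Str.replace segment "''" "") "'" % 2 = 1)

-- ===== PRECONDITION & SPEC =====
def Spec_apex_in_single_quoted_string_py (source : String) (pos : Int) (out : Bool) : Prop := out = apex_in_single_quoted_string_py_alt source pos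
instance (source : String) (pos : Int) (out : Bool) : Decidable (Spec_apex_in_single_quoted_string_py source pos out) := by unfold Spec_apex_in_single_quoted_string_py; infer_instance

-- ===== CLAIM (what is proved, stated in full; the proofs are below) =====
def Claim_equal_apex_in_single_quoted_string_py : Prop := ∀ (source : String) (pos : Int), Dom_apex_in_single_quoted_string_py source pos → Spec_apex_in_single_quoted_string_py source pos (apex_in_single_quoted_string_py source pos)

-- ===== LEMMAS AND PROOFS =====

-- the result of segment.replace("''", ""), as a direct recursion (proof-only spec)
def pvDropPairs : List Char → List Char
  | [] => []
  | c :: t =>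
    if c = '\'' ∧ t.head? = some '\'' then pvDropPairs t.tail
    else c :: pvDropPairs t
termination_by l => l.length
decreasing_by all_goals simp [List.length_tail]

theorem pvPrefix_iff (c : Char) (t : List Char) :
    (['\'', '\''] : List Char).isPrefixOf (c :: t) = true ↔ (c = '\'' ∧ t.head? = some '\'') := by
  rw [List.isPrefixOf_iff_prefix]
  cases t with
  | nil => simp [List.cons_prefix_cons]
  | cons c2 t2 => simp [List.cons_prefix_cons, eq_comm]

theorem pvReplace_go_eq (fuel : Nat) (l acc : List Char) (h : l.length ≤ fuel) :
    PySem.Chars.replace.go ['\'', '\''] [] fuel l acc = acc.reverse ++ pvDropPairs l := by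
  induction fuel generalizing l acc with
  | zero =>
    cases l with
    | nil => simp [PySem.Chars.replace.go, pvDropPairs]
    | cons c t => simp at h
  | succ fuel ih =>
    cases l with
    | nil => simp [PySem.Chars.replace.go, pvDropPairs]
    | cons c t =>
      simp only [List.length_cons] at h
      by_cases hp : (['\'', '\''] : List Char).isPrefixOf (c :: t) = true
      · obtain ⟨hc, hh⟩ := (pvPrefix_iff c t).1 hp
        obtain ⟨t2, rfl⟩ : ∃ t2, t = '\'' :: t2 := by
          cases t with
          | nil => simp at hh
          | cons c2 t2 => simp at hh; exact ⟨t2, by rw [hh]⟩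
        subst hc
        rw [PySem.Chars.replace.go, if_pos hp]
        have hrec := ih t2 acc (by simp at h; omega)
        simp [hrec, pvDropPairs]
      · rw [PySem.Chars.replace.go, if_neg hp]
        rw [ih t (c :: acc) (by omega)]
        have hcond : ¬(c = '\'' ∧ t.head? = some '\'') := fun hx => hp ((pvPrefix_iff c t).2 hx)
        rw [pvDropPairs, if_neg hcond]
        simp

theorem pvCount_go_eq (fuel : Nat) (l : List Char) (acc : Nat) (h : l.length ≤ fuel) :
    PySem.Chars.count.go ['\''] fuel l acc = acc + l.count '\'' := by
  induction fuel generalizing l acc with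
  | zero =>
    cases l with
    | nil => simp [PySem.Chars.count.go]
    | cons c t => simp at h
  | succ fuel ih =>
    cases l with
    | nil => simp [PySem.Chars.count.go]
    | cons c t =>
      simp only [List.length_cons] at h
      by_cases hc : c = '\''
      · subst hc
        rw [PySem.Chars.count.go, if_pos (by rw [List.isPrefixOf_iff_prefix]; simp [List.cons_prefix_cons])]
        have hrec := ih t (acc + 1) (by omega)
        simp only [List.length_cons, List.length_nil] at hrec ⊢
        simp [hrec]
        omega
      · rw [PySem.Chars.count.go, if_neg (by rw [List.isPrefixOf_iff_prefix]; simp [List.cons_prefix_cons, Ne.symm hc])]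
        rw [ih t acc (by omega)]
        simp [hc]

theorem pvReplace_eq (l : List Char) :
    PySem.Chars.replace l ['\'', '\''] [] = pvDropPairs l := by
  rw [PySem.Chars.replace]
  simp only [List.isEmpty_cons, Bool.false_eq_true, if_false]
  exact pvReplace_go_eq l.length l [] le_rfl

theorem pvCount_eq (l : List Char) :
    PySem.Chars.count l ['\''] = l.count '\'' := by
  rw [PySem.Chars.count]
  simp only [List.isEmpty_cons, Bool.false_eq_true, if_false]
  simpa using pvCount_go_eq l.length l 0 le_rfl

theorem pvScanA_parity (l : List Char) (b : Bool) :
    pvScanA l b = (b ^^ decide ((pvDropPairs l).count '\'' % 2 = 1)) := by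
  fun_induction pvScanA l b with
  | case1 b => simp [pvDropPairs]
  | case2 c rest b hcond ih =>
    rw [pvDropPairs, if_pos hcond]
    exact ih
  | case3 rest b hcond ih =>
    rw [pvDropPairs, if_neg hcond, ih]
    rcases Nat.mod_two_eq_zero_or_one ((pvDropPairs rest).count '\'') with h0 | h0 <;>
      rcases b with _ | _ <;>
        simp [Nat.add_mod, h0]
  | case4 c rest b hcond hc ih =>
    rw [pvDropPairs, if_neg hcond, ih]
    simp [hc]

theorem pvMain (l : List Char) :
    pvScanA l false = decide (PySem.Chars.count (PySem.Chars.replace l ['\'', '\''] []) ['\''] % 2 = 1) := by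
  rw [pvReplace_eq, pvCount_eq, pvScanA_parity]
  simp

-- ===== VERDICT (by name: the statement is the Claim_ definition above) =====
theorem apex_in_single_quoted_string_py_spec : Claim_equal_apex_in_single_quoted_string_py := by
  intro source pos _
  unfold Spec_apex_in_single_quoted_string_py
  unfold apex_in_single_quoted_string_py apex_in_single_quoted_string_py_alt
  simp only [PySem.Str.count, PySem.Str.replace, String.toList_ofList]
  exact pvMain _
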